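-- pv_equiv track=rewrite | github.com/sariswis/Proyectos-IP-2022-1 | Proyecto 3/ovnis.py | avistamientos_por_ciudad
-- ===== SOURCE A (Python) =====
-- def avistamientos_por_ciudad(avistamientos:dict)->dict:
--     ciudades = {}
--     for l_pais in avistamientos.values():
--         for avistamiento in l_pais:
--             if avistamiento["city"] not in ciudades.keys():
--                 ciudades[avistamiento["city"]] = [avistamiento]
--             else:
--                 ciudades[avistamiento["city"]].append(avistamiento)
--     return ciudades
-- ===== SOURCE B (Python) =====
-- def avistamientos_por_ciudad(avistamientos: dict) -> dict:
--     planos = [a for l_pais in avistamientos.values() for a in l_pais]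
--     return {a["city"]: [b for b in planos if b["city"] == a["city"]]
--             for a in planos}
-- ===== Notes on version B (the rewrite author's own statement) =====
-- stated objective: simpler
-- what changed: Replaces incremental dict bucketing (contains-check, create-or-append per element) by flattening all sightings once and building the result as a dict comprehension that rescans the flat list with a per-city filter; key order (first occurrence) and each city's list are identical.
import Mathlib
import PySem

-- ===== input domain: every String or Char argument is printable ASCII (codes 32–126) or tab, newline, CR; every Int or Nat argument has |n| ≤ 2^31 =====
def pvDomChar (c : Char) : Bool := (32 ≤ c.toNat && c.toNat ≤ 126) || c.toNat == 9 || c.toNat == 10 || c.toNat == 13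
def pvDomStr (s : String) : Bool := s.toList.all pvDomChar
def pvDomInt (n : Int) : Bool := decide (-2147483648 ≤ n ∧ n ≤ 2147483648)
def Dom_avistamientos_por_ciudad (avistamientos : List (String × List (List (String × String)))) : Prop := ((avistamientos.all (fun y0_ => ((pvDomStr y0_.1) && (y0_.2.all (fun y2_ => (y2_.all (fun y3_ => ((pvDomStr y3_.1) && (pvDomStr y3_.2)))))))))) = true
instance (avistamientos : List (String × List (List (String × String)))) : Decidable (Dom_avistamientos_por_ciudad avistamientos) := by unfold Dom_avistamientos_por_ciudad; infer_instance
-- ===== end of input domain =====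

-- B replaces A's incremental bucketing (contains-check then create-or-append) by flatten + per-city
-- filter in a dict comprehension: a simpler decomposition, same return value (equivalence is about the
-- return value; neither version mutates its argument).

-- shared transliteration of the Python subscript a["city"] (dict lookup; none = KeyError)
def pvCity? (a : List (String × String)) : Option String :=
  PySem.Dict.get? (PySem.Dict.ofList a) "city"

-- the key actually used by both folds (Pre_ guarantees pvCity? is some, so the default is never taken)
def pvKey (a : List (String × String)) : String := (pvCity? a).getD ""

-- ===== PORT A =====
def avistamientos_por_ciudad (avistamientos : List (String × List (List (String × String)))) : List (String × List (List (String × String))) :=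
  let ciudades :=
    (PySem.Dict.ofList avistamientos).values.foldl
      (fun d l_pais =>
        l_pais.foldl
          (fun d avistamiento =>
            if d.contains (pvKey avistamiento) = false then
              d.insert (pvKey avistamiento) [avistamiento]
            else
              d.modify (pvKey avistamiento) [] (fun l => l ++ [avistamiento]))
          d)
      PySem.Dict.empty
  ciudades.items

-- ===== PORT B =====
def avistamientos_por_ciudad_alt (avistamientos : List (String × List (List (String × String)))) : List (String × List (List (String × String))) :=
  let planos := (PySem.Dict.ofList avistamientos).values.flatten
  (planos.foldl
      (fun d a => d.insert (pvKey a) (planos.filter (fun b => pvKey b == pvKey a)))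
      PySem.Dict.empty).items

-- ===== PRECONDITION & SPEC =====
-- Pre_ excludes exactly the inputs where some sighting lacks the "city" key: there the Python A
-- raises KeyError (and so does B).
def Pre_avistamientos_por_ciudad (avistamientos : List (String × List (List (String × String)))) : Prop :=
  ∀ l ∈ (PySem.Dict.ofList avistamientos).values, ∀ a ∈ l, (pvCity? a).isSome = true
instance (avistamientos : List (String × List (List (String × String)))) : Decidable (Pre_avistamientos_por_ciudad avistamientos) := by unfold Pre_avistamientos_por_ciudad; infer_instance

def pvWitness_avistamientos_por_ciudad : (List (String × List (List (String × String)))) :=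
  [("us", [[("city", "nyc"), ("shape", "disk")], [("city", "reno")]]), ("mx", [])]

def Spec_avistamientos_por_ciudad (avistamientos : List (String × List (List (String × String)))) (out : List (String × List (List (String × String)))) : Prop := out = avistamientos_por_ciudad_alt avistamientos
instance (avistamientos : List (String × List (List (String × String)))) (out : List (String × List (List (String × String)))) : Decidable (Spec_avistamientos_por_ciudad avistamientos out) := by unfold Spec_avistamientos_por_ciudad; infer_instance

-- ===== CLAIM (what is proved, stated in full; the proofs are below) =====
def Claim_equal_avistamientos_por_ciudad : Prop := ∀ (avistamientos : List (String × List (List (String × String)))), Dom_avistamientos_por_ciudad avistamientos → Pre_avistamientos_por_ciudad avistamientos → Spec_avistamientos_por_ciudad avistamientos (avistamientos_por_ciudad avistamientos)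

-- ===== LEMMAS AND PROOFS =====

-- A's loop body is exactly Python's d[k] = d.get(k, []) + [a], i.e. Dict.modify (both branches agree)
theorem stepA_eq_modify (d : PySem.Dict String (List (List (String × String)))) (a : List (String × String)) :
    (if d.contains (pvKey a) = false then
      d.insert (pvKey a) [a]
    else
      d.modify (pvKey a) [] (fun l => l ++ [a]))
    = d.modify (pvKey a) [] (fun l => l ++ [a]) := by
  by_cases h : d.contains (pvKey a) = false
  · simp only [h, if_true]
    have : d.modify (pvKey a) [] (fun l => l ++ [a]) = d.insert (pvKey a) ((d.getD (pvKey a) []) ++ [a]) := rfl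
    rw [this, PySem.Dict.getD_of_not_contains d [] h]
    simp
  · simp [h]

-- getD of a fold of inserts whose value depends only on the key
theorem getD_foldl_insert_keyfun (F : String → List (List (String × String)))
    (l : List (List (String × String))) (d : PySem.Dict String (List (List (String × String)))) (c : String) :
    (l.foldl (fun d a => d.insert (pvKey a) (F (pvKey a))) d).getD c []
      = if c ∈ l.map pvKey then F c else d.getD c [] := by
  induction l generalizing d with
  | nil => simp
  | cons a t ih =>
    simp only [List.foldl_cons, ih, List.map_cons, List.mem_cons]
    by_cases ht : c ∈ t.map pvKey
    · simp [ht]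
    · by_cases hc : c = pvKey a
      · simp [hc, PySem.Dict.getD_insert_self]
      · simp only [ht, hc, or_self, if_false]
        exact PySem.Dict.getD_insert_of_ne d _ [] hc

-- ===== VERDICT (by name: the statement is the Claim_ definition above) =====
theorem avistamientos_por_ciudad_spec : Claim_equal_avistamientos_por_ciudad := by
  intro av _ _
  show _ = _
  unfold avistamientos_por_ciudad avistamientos_por_ciudad_alt
  simp only []
  set flat := (PySem.Dict.ofList av).values.flatten with hflat
  rw [← List.foldl_flatten, ← hflat]
  -- fold A into the modify form
  have hA : flat.foldl
      (fun d a =>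
        if d.contains (pvKey a) = false then d.insert (pvKey a) [a]
        else d.modify (pvKey a) [] (fun l => l ++ [a])) PySem.Dict.empty
      = flat.foldl (fun d a => d.modify (pvKey a) [] (fun l => l ++ [a])) PySem.Dict.empty := by
    exact PySem.List.foldl_congr_mem _ _ _ _ (fun d a _ => stepA_eq_modify d a)
  rw [hA]
  set dA := flat.foldl (fun d a => d.modify (pvKey a) [] (fun l => l ++ [a])) PySem.Dict.empty with hdA
  set dB := flat.foldl (fun d a => d.insert (pvKey a) (flat.filter (fun b => pvKey b == pvKey a))) PySem.Dict.empty with hdB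
  have hkA : dA.keys = PySem.Set.ofList (flat.map pvKey) := by
    rw [hdA, PySem.Dict.keys_foldl_modify_key]
    simp [PySem.Set.update, PySem.Set.ofList_eq_foldl]
  have hkB : dB.keys = PySem.Set.ofList (flat.map pvKey) := by
    rw [hdB, PySem.Dict.keys_foldl_insert_key]
    simp [PySem.Set.update, PySem.Set.ofList_eq_foldl]
  have hndA : dA.keys.Nodup := by
    rw [hkA]; exact PySem.Set.nodup_ofList _
  have hndB : dB.keys.Nodup := by
    rw [hkB]; exact PySem.Set.nodup_ofList _
  have hgA : ∀ c, dA.getD c [] = flat.filter (fun b => pvKey b == c) := by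
    intro c
    have hm : dA = (flat.map (fun a => (pvKey a, a))).foldl
        (fun d p => d.modify p.1 [] (fun l => l ++ [p.2])) PySem.Dict.empty := by
      rw [hdA, List.foldl_map]
    rw [hm, PySem.Dict.getD_foldl_modify_append]
    simp [List.filter_map, Function.comp_def]
  have hgB : ∀ c, c ∈ flat.map pvKey → dB.getD c [] = flat.filter (fun b => pvKey b == c) := by
    intro c hc
    rw [hdB, getD_foldl_insert_keyfun (F := fun c => flat.filter (fun b => pvKey b == c))]
    simp [hc]
  rw [PySem.Dict.items_eq_map_keys dA hndA [], PySem.Dict.items_eq_map_keys dB hndB [], hkA, hkB]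
  apply List.map_congr_left
  intro c hc
  have hmem : c ∈ flat.map pvKey := (PySem.Set.mem_ofList _ _).mp hc
  rw [hgA c, hgB c hmem]
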